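-- pv_equiv track=rewrite | github.com/DipperChen2007/Skibidi_Enhancer | S/13/13_s2_practice.py | Bridge_Transport
-- ===== SOURCE A (Python) =====
-- def Bridge_Transport(max_weight,trains):
--     numbers = len(trains)
--     initial = []
--     current_number = 0
--     current_weight = 0
--     if numbers <= 4:
--         for train in trains:
--             initial.append(train)
--             current_weight += train
--             if current_weight > max_weight:
--                 return current_number
--             current_number += 1
--         return numbers
--     else:
--         for i in range(4):
--             initial.append(trains[i])
--             current_weight += trains[i]
--             if current_weight > max_weight:
--                 return current_number
--             current_number += 1
--
--         for i in range(4,len(trains)):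
--             current_weight -= initial[0]
--             initial.pop(0)
--             initial.append(trains[i])
--             current_weight += trains[i]
--             if current_weight > max_weight:
--                 return current_number
--             current_number += 1
--     return current_number
-- ===== SOURCE B (Python) =====
-- def Bridge_Transport(max_weight, trains):
--     for i in range(len(trains)):
--         if sum(trains[max(0, i - 3):i + 1]) > max_weight:
--             return i
--     return len(trains)
-- ===== Notes on version B (the rewrite author's own statement) =====
-- stated objective: simpler
-- what changed: Replaced the two-phase incremental sliding-window (maintained accumulator, size-4 buffer with pop/append, separate prefix loop) by a single index loop that recomputes each window sum directly as sum(trains[max(0,i-3):i+1]).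
import Mathlib
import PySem

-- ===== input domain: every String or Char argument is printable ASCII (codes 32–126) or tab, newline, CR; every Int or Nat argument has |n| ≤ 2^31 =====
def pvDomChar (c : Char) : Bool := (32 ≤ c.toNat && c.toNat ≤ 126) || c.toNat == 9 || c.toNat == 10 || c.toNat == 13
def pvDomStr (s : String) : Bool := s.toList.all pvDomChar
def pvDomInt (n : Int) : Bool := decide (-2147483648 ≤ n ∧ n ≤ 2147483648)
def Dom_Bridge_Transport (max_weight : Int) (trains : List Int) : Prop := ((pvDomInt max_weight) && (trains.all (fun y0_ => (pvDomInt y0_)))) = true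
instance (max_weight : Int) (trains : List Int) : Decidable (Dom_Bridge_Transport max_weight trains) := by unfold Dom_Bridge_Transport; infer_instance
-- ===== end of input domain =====

-- B replaces A's two-phase incremental sliding window (accumulator + size-4 buffer) by one
-- loop recomputing each window sum from a slice; objective: simpler.

-- ===== PORT A =====
-- the shared body of A's first two loops: append to `initial`, add to `current_weight`,
-- early-return `current_number` on overflow; returns (early result?, initial, cn, cw)
def bridgePrefix (mw : Int) : List Int → List Int → Int → Int → Option Int × List Int × Int × Int
  | [], initial, cn, cw => (none, initial, cn, cw)
  | t :: rest, initial, cn, cw =>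
      let initial' := initial ++ [t]
      let cw' := cw + t
      if cw' > mw then (some cn, initial', cn, cw')
      else bridgePrefix mw rest initial' (cn + 1) cw'

-- A's second loop (indices 4..n-1): slide the buffer, early-return on overflow
def bridgeBig (mw : Int) : List Int → List Int → Int → Int → Int
  | [], _, cn, _ => cn
  | t :: rest, initial, cn, cw =>
      let cw' := cw - initial.headD 0   -- initial[0]; initial always has 4 elements here
      let initial' := initial.tail ++ [t]
      let cw'' := cw' + t
      if cw'' > mw then cn else bridgeBig mw rest initial' (cn + 1) cw''

def Bridge_Transport (max_weight : Int) (trains : List Int) : Int :=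
  let numbers : Int := trains.length
  if numbers ≤ 4 then
    match bridgePrefix max_weight trains [] 0 0 with
    | (some r, _, _, _) => r
    | (none, _, _, _) => numbers
  else
    match bridgePrefix max_weight (trains.take 4) [] 0 0 with
    | (some r, _, _, _) => r
    | (none, initial, cn, cw) => bridgeBig max_weight (trains.drop 4) initial cn cw

-- ===== PORT B =====
def altGo (mw : Int) (trains : List Int) (i : Nat) : Int :=
  if i < trains.length then
    if (PySem.List.slice trains (some (max 0 ((i : Int) - 3))) (some ((i : Int) + 1))).sum > mw
    then (i : Int)
    else altGo mw trains (i + 1)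
  else (trains.length : Int)
termination_by trains.length - i

def Bridge_Transport_alt (max_weight : Int) (trains : List Int) : Int :=
  altGo max_weight trains 0

-- ===== PRECONDITION & SPEC =====
def Spec_Bridge_Transport (max_weight : Int) (trains : List Int) (out : Int) : Prop := out = Bridge_Transport_alt max_weight trains
instance (max_weight : Int) (trains : List Int) (out : Int) : Decidable (Spec_Bridge_Transport max_weight trains out) := by unfold Spec_Bridge_Transport; infer_instance

-- ===== CLAIM (what is proved, stated in full; the proofs are below) =====
def Claim_equal_Bridge_Transport : Prop := ∀ (max_weight : Int) (trains : List Int), Dom_Bridge_Transport max_weight trains → Spec_Bridge_Transport max_weight trains (Bridge_Transport max_weight trains)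

-- ===== LEMMAS AND PROOFS =====

-- B's slice is the window [i-3, i] (clamped at 0), as drop/take
lemma window_eq (trains : List Int) (i : Nat) :
    PySem.List.slice trains (some (max 0 ((i : Int) - 3))) (some ((i : Int) + 1))
      = (trains.drop (i - 3)).take ((i + 1) - (i - 3)) := by
  have h1 : (max 0 ((i : Int) - 3)).toNat = i - 3 := by omega
  have h2 : (((i : Int)) + 1).toNat = i + 1 := by omega
  rw [PySem.List.slice_toNat (ha := le_max_left _ _) (hb := by positivity), h1, h2]

lemma altGo_lt (mw : Int) (trains : List Int) (i : Nat) (h : i < trains.length) :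
    altGo mw trains i
      = if ((trains.drop (i - 3)).take ((i + 1) - (i - 3))).sum > mw then (i : Int)
        else altGo mw trains (i + 1) := by
  rw [altGo]; simp [h, window_eq]

lemma altGo_ge (mw : Int) (trains : List Int) (i : Nat) (h : trains.length ≤ i) :
    altGo mw trains i = trains.length := by
  rw [altGo]; simp [Nat.not_lt.mpr h]

-- A's second loop agrees with B from any index m+4 on
lemma big_eq (mw : Int) (trains : List Int) : ∀ (xs : List Int) (m : Nat),
    xs = trains.drop (m + 4) → m + 4 ≤ trains.length →
    bridgeBig mw xs ((trains.drop m).take 4) ((m : Int) + 4) (((trains.drop m).take 4).sum)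
      = altGo mw trains (m + 4) := by
  intro xs
  induction xs with
  | nil =>
    intro m hxs hle
    have h1 : trains.length ≤ m + 4 := List.drop_eq_nil_iff.mp hxs.symm
    have hlen : trains.length = m + 4 := by omega
    rw [altGo_ge mw trains (m + 4) (by omega)]
    simp only [bridgeBig]
    rw [hlen]; push_cast; ring
  | cons t rest ih =>
    intro m hxs hle
    have hlt : m + 4 < trains.length := by
      have hlen := congrArg List.length hxs
      simp [List.length_drop] at hlen
      omega
    have htm4 : trains[m + 4]? = some t := by
      have h0 : (trains.drop (m + 4))[0]? = some t := by rw [← hxs]; rfl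
      rw [List.getElem?_drop] at h0; simpa using h0
    have hm : m < trains.length := by omega
    have hdm : trains.drop m = trains[m] :: trains.drop (m + 1) :=
      List.drop_eq_getElem_cons hm
    have h3 : (trains.drop (m + 1))[3]? = some t := by
      rw [List.getElem?_drop]
      have he : m + 1 + 3 = m + 4 := by omega
      rw [he]; exact htm4
    have htake4 : (trains.drop (m + 1)).take 4 = (trains.drop (m + 1)).take 3 ++ [t] := by
      have h4 : (4 : Nat) = 3 + 1 := rfl
      rw [h4, List.take_add_one, h3]; rfl
    have hrest : rest = trains.drop (m + 1 + 4) := by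
      have ht := congrArg List.tail hxs
      simp only [List.tail_cons, List.tail_drop] at ht
      have he : m + 1 + 4 = m + 4 + 1 := by omega
      rw [he]; exact ht
    rw [altGo_lt mw trains (m + 4) hlt]
    have hw1 : m + 4 - 3 = m + 1 := by omega
    have hw2 : m + 4 + 1 - (m + 1) = 4 := by omega
    rw [hw1, hw2, htake4]
    rw [hdm]
    simp only [bridgeBig, List.take_succ_cons, List.headD_cons, List.tail_cons,
      List.sum_cons, List.sum_append, List.sum_nil, add_zero]
    have hs : trains[m] + ((trains.drop (m + 1)).take 3).sum - trains[m] + t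
        = ((trains.drop (m + 1)).take 3).sum + t := by ring
    rw [hs]
    by_cases hc : ((trains.drop (m + 1)).take 3).sum + t > mw
    · rw [if_pos hc, if_pos hc]; push_cast; ring
    · rw [if_neg hc, if_neg hc]
      have ihh := ih (m + 1) hrest (by omega)
      rw [htake4] at ihh
      simp only [List.sum_append, List.sum_cons, List.sum_nil, add_zero] at ihh
      have he : m + 1 + 4 = m + 4 + 1 := by omega
      rw [he] at ihh
      push_cast at ihh ⊢
      convert ihh using 2

-- A's prefix loop (shared by both branches) agrees with B when n ≤ 4
lemma small_eq (mw : Int) (trains : List Int) (hn : trains.length ≤ 4) :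
    ∀ (xs : List Int) (k : Nat) (init : List Int),
    xs = trains.drop k → k ≤ trains.length →
    (match bridgePrefix mw xs init (k : Int) ((trains.take k).sum) with
     | (some r, _, _, _) => r
     | (none, _, _, _) => (trains.length : Int)) = altGo mw trains k := by
  intro xs
  induction xs with
  | nil =>
    intro k init hxs hk
    have h1 : trains.length ≤ k := List.drop_eq_nil_iff.mp hxs.symm
    simp only [bridgePrefix]
    rw [altGo_ge mw trains k h1]
  | cons t rest ih =>
    intro k init hxs hk
    have hlt : k < trains.length := by
      have hlen := congrArg List.length hxs
      simp [List.length_drop] at hlen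
      omega
    have htk : trains[k]? = some t := by
      have h0 : (trains.drop k)[0]? = some t := by rw [← hxs]; rfl
      rw [List.getElem?_drop] at h0; simpa using h0
    have htake : trains.take (k + 1) = trains.take k ++ [t] := by
      rw [List.take_add_one, htk]; rfl
    have hcs : (trains.take (k + 1)).sum = (trains.take k).sum + t := by
      rw [htake]; simp
    have hrest : rest = trains.drop (k + 1) := by
      have ht := congrArg List.tail hxs
      simp only [List.tail_cons, List.tail_drop] at ht
      exact ht
    rw [altGo_lt mw trains k hlt]
    have hw1 : k - 3 = 0 := by omega
    have hw2 : k + 1 - 0 = k + 1 := by omega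
    rw [hw1, hw2]
    simp only [List.drop_zero]
    simp only [bridgePrefix, hcs]
    by_cases hc : (trains.take k).sum + t > mw
    · simp only [if_pos hc]
    · simp only [if_neg hc]
      have ihh := ih (k + 1) (init ++ [t]) hrest (by omega)
      rw [hcs] at ihh
      push_cast at ihh ⊢
      exact ihh

-- A's prefix loop followed by the big loop agrees with B when n > 4
lemma pref_eq (mw : Int) (trains : List Int) (hn : 4 < trains.length) :
    ∀ (xs : List Int) (k : Nat),
    xs = (trains.take 4).drop k → k ≤ 4 →
    (match bridgePrefix mw xs (trains.take k) (k : Int) ((trains.take k).sum) with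
     | (some r, _, _, _) => r
     | (none, init, cn, cw) => bridgeBig mw (trains.drop 4) init cn cw) = altGo mw trains k := by
  intro xs
  induction xs with
  | nil =>
    intro k hxs hk
    have hlen4 : (trains.take 4).length = 4 := by
      simp [List.length_take]; omega
    have h1 : (trains.take 4).length ≤ k := List.drop_eq_nil_iff.mp hxs.symm
    have hk4 : k = 4 := by omega
    subst hk4
    simp only [bridgePrefix]
    have := big_eq mw trains (trains.drop 4) 0 (by simp) (by omega)
    simpa using this
  | cons t rest ih =>
    intro k hxs hk
    have hlen4 : (trains.take 4).length = 4 := by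
      simp [List.length_take]; omega
    have hk4 : k < 4 := by
      have hlen := congrArg List.length hxs
      simp [List.length_drop, hlen4] at hlen
      omega
    have hlt : k < trains.length := by omega
    have htk' : (trains.take 4)[k]? = some t := by
      have h0 : ((trains.take 4).drop k)[0]? = some t := by rw [← hxs]; rfl
      rw [List.getElem?_drop] at h0; simpa using h0
    have htk : trains[k]? = some t := by
      rw [List.getElem?_take_of_lt hk4] at htk'; exact htk'
    have htake : trains.take (k + 1) = trains.take k ++ [t] := by
      rw [List.take_add_one, htk]; rfl
    have hcs : (trains.take (k + 1)).sum = (trains.take k).sum + t := by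
      rw [htake]; simp
    have hrest : rest = (trains.take 4).drop (k + 1) := by
      have ht := congrArg List.tail hxs
      simp only [List.tail_cons, List.tail_drop] at ht
      exact ht
    rw [altGo_lt mw trains k hlt]
    have hw1 : k - 3 = 0 := by omega
    have hw2 : k + 1 - 0 = k + 1 := by omega
    rw [hw1, hw2]
    simp only [List.drop_zero]
    simp only [bridgePrefix, hcs]
    by_cases hc : (trains.take k).sum + t > mw
    · simp only [if_pos hc]
    · simp only [if_neg hc]
      have ihh := ih (k + 1) hrest (by omega)
      rw [hcs, htake] at ihh
      push_cast at ihh ⊢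
      exact ihh

-- ===== VERDICT (by name: the statement is the Claim_ definition above) =====
theorem Bridge_Transport_spec : Claim_equal_Bridge_Transport := by
  intro mw trains _
  unfold Spec_Bridge_Transport Bridge_Transport Bridge_Transport_alt
  by_cases h : (trains.length : Int) ≤ 4
  · simp only [h, if_true]
    have := small_eq mw trains (by exact_mod_cast h) trains 0 [] (by simp) (Nat.zero_le _)
    simpa using this
  · simp only [h, if_false]
    have := pref_eq mw trains (by omega) (trains.take 4) 0 (by simp) (by omega)
    simpa using this
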